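-- pv_equiv track=rewrite | github.com/havarpan/neoprechac | src/python/patternTableToSyncAnimationUrl.py | strip_zeros
-- ===== SOURCE A (Python) =====
-- def strip_zeros(myrows, table_data):
--     stripped_rows = []
--     for j, row in enumerate(myrows):
--         stripped_row = []
--         for i, throw in enumerate(row):
--             if i == 0 and not table_data[j][i]:
--                 stripped_row.append('0')
--             if table_data[j][i]:
--                 stripped_row.append(throw)
--         stripped_rows.append(stripped_row)
--     return stripped_rows
-- ===== SOURCE B (Python) =====
-- def strip_zeros(myrows, table_data):
--     # Stage 1: normalize the inputs so there is no special case left: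
--     # a falsy leading flag means "emit '0' in place of the first throw",
--     # which we encode by patching the pair to (['0'] + rest, [True] + rest).
--     patched = []
--     for row, flags in zip(myrows, table_data):
--         if row and not flags[0]:
--             patched.append((['0'] + row[1:], [True] + flags[1:]))
--         else:
--             patched.append((row, flags))
--     # Stage 2: one uniform mask filter over the normalized pairs.
--     return [[t for t, f in zip(row, flags) if f] for row, flags in patched]
-- ===== Notes on version B (the rewrite author's own statement) =====
-- stated objective: alternative
-- what changed: Two staged passes replace A's interleaved indexed loop: a normalization pass rewrites each (row, flags) pair so a falsy leading flag becomes a literal '0' cell with a true flag, after which a single uniform mask filter produces the output with no special case at all.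
-- outside the precondition, e.g. on strip_zeros([[]], []): A returns [[]], B returns []
import Mathlib
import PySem

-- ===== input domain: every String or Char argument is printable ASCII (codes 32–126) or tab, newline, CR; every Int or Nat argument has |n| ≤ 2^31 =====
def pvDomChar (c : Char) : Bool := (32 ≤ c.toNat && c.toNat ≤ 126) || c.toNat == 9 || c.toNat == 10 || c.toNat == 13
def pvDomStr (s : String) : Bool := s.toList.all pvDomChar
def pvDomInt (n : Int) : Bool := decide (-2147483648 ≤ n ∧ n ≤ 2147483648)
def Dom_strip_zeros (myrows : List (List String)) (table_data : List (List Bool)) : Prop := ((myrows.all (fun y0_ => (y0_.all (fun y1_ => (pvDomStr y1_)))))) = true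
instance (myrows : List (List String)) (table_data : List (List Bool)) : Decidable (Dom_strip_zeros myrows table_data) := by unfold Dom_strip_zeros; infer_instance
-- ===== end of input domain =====

-- B replaces A's interleaved indexed loop by two staged passes: normalize each (row, flags)
-- pair (a falsy leading flag becomes a literal '0' cell with a true flag), then one uniform mask filter.

-- ===== PORT A =====
-- inner for-loop of A: index i over the row, reading table_data[j][i] (= flags.getD i).
-- List.getD is exact for the in-range indices Pre_ admits; on out-of-range Python raises IndexError (excluded by Pre_).
def pvInnerA (flags : List Bool) : Nat → List String → List String → List String
  | _, acc, [] => acc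
  | i, acc, t :: ts =>
      pvInnerA flags (i + 1)
        (acc ++ (if i = 0 ∧ flags.getD i false = false then ["0"] else []) ++
          (if flags.getD i false then [t] else [])) ts

-- outer for-loop of A: index j over myrows, appending each stripped row.
def pvOuterA (td : List (List Bool)) : Nat → List (List String) → List (List String) → List (List String)
  | _, acc, [] => acc
  | j, acc, row :: rows => pvOuterA td (j + 1) (acc ++ [pvInnerA (td.getD j []) 0 [] row]) rows

def strip_zeros (myrows : List (List String)) (table_data : List (List Bool)) : List (List String) :=
  pvOuterA table_data 0 [] myrows

-- ===== PORT B =====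
-- stage 1 body: patch the pair when the row is non-empty and the leading flag is false
def pvPatch (p : List String × List Bool) : List String × List Bool :=
  if p.1 ≠ [] ∧ p.2.headD true = false then ("0" :: p.1.tail, true :: p.2.tail) else p

-- stage 2 body: [t for t, f in zip(row, flags) if f]
def pvKept (row : List String) (flags : List Bool) : List String :=
  (row.zip flags).filterMap (fun p => if p.2 then some p.1 else none)

def strip_zeros_alt (myrows : List (List String)) (table_data : List (List Bool)) : List (List String) :=
  (((myrows.zip table_data).map pvPatch)).map (fun p => pvKept p.1 p.2)

-- ===== PRECONDITION & SPEC =====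
-- Pre_ excludes (a) rows longer than their flag list, where A raises IndexError, and
-- (b) table_data shorter than myrows: there A raises too unless every surplus row is empty —
-- on that corner A's empty rows are an artefact (it never indexes table_data) while B's zip truncates.
def Pre_strip_zeros (myrows : List (List String)) (table_data : List (List Bool)) : Prop :=
  myrows.length ≤ table_data.length ∧
    ∀ j ∈ List.range myrows.length, (myrows.getD j []).length ≤ (table_data.getD j []).length
instance (myrows : List (List String)) (table_data : List (List Bool)) : Decidable (Pre_strip_zeros myrows table_data) := by
  unfold Pre_strip_zeros; infer_instance

def pvWitness_strip_zeros : List (List String) × List (List Bool) :=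
  ([["1", "2"], []], [[true, false], [true]])

def Spec_strip_zeros (myrows : List (List String)) (table_data : List (List Bool)) (out : List (List String)) : Prop := out = strip_zeros_alt myrows table_data
instance (myrows : List (List String)) (table_data : List (List Bool)) (out : List (List String)) : Decidable (Spec_strip_zeros myrows table_data out) := by unfold Spec_strip_zeros; infer_instance

-- ===== CLAIM (what is proved, stated in full; the proofs are below) =====
def Claim_equal_strip_zeros : Prop := ∀ (myrows : List (List String)) (table_data : List (List Bool)), Dom_strip_zeros myrows table_data → Pre_strip_zeros myrows table_data → Spec_strip_zeros myrows table_data (strip_zeros myrows table_data)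

-- ===== LEMMAS AND PROOFS =====

-- tail of A's inner loop (i ≥ 1) is the zip-filter over the remaining flags
lemma pvInnerA_tail (flags : List Bool) :
    ∀ (ts : List String) (i : Nat) (acc : List String), 1 ≤ i → i + ts.length ≤ flags.length →
      pvInnerA flags i acc ts = acc ++ pvKept ts (flags.drop i) := by
  intro ts
  induction ts with
  | nil => intro i acc _ _; simp [pvInnerA, pvKept]
  | cons t ts ih =>
      intro i acc hi hlen
      have hlt : i < flags.length := by simp at hlen; omega
      have hdrop : flags.drop i = flags[i] :: flags.drop (i + 1) :=
        List.drop_eq_getElem_cons hlt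
      have hgd : flags.getD i false = flags[i] := List.getD_eq_getElem _ _ hlt
      have hne : ¬ (i = 0) := by omega
      rw [pvInnerA, ih (i + 1) _ (by omega) (by simp at hlen ⊢; omega)]
      simp only [hne, false_and, if_false, hgd, hdrop, pvKept, List.zip_cons_cons,
        List.filterMap_cons]
      by_cases hf : flags[i] <;> simp [hf]

-- A's full inner loop equals B's patch-then-filter for one row
lemma pvInnerA_eq (row : List String) (flags : List Bool) (h : row.length ≤ flags.length) :
    pvInnerA flags 0 [] row = pvKept (pvPatch (row, flags)).1 (pvPatch (row, flags)).2 := by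
  cases row with
  | nil => simp [pvInnerA, pvKept, pvPatch]
  | cons t ts =>
      cases flags with
      | nil => simp at h
      | cons f fs =>
          rw [pvInnerA, pvInnerA_tail (f :: fs) ts 1 _ (by omega) (by simp at h ⊢; omega)]
          simp only [List.getD_cons_zero, List.drop_succ_cons, List.drop_zero, pvPatch,
            List.headD_cons, pvKept, List.zip_cons_cons, List.filterMap_cons]
          by_cases hf : f <;> simp [hf]

-- A's outer loop (from index j) equals B's two mapped passes over the rest
lemma pvOuterA_eq (td : List (List Bool)) :
    ∀ (rows : List (List String)) (j : Nat) (acc : List (List String)),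
      j + rows.length ≤ td.length →
      (∀ k ∈ List.range rows.length, (rows.getD k []).length ≤ (td.getD (j + k) []).length) →
      pvOuterA td j acc rows =
        acc ++ ((rows.zip (td.drop j)).map pvPatch).map (fun p => pvKept p.1 p.2) := by
  intro rows
  induction rows with
  | nil => intro j acc _ _; simp [pvOuterA]
  | cons row rows ih =>
      intro j acc hlen hall
      have hlt : j < td.length := by simp at hlen; omega
      have hdrop : td.drop j = td[j] :: td.drop (j + 1) := List.drop_eq_getElem_cons hlt
      have hgd : td.getD j [] = td[j] := List.getD_eq_getElem _ _ hlt
      have hrow : row.length ≤ (td.getD j []).length := by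
        have := hall 0 (by simp); simpa using this
      rw [pvOuterA, ih (j + 1) _ (by simp at hlen ⊢; omega) ?_]
      · rw [hdrop]
        simp only [List.zip_cons_cons, List.map_cons]
        rw [List.append_assoc, hgd, pvInnerA_eq row td[j] (by rwa [hgd] at hrow)]
        simp
      · intro k hk
        have := hall (k + 1) (by simp at hk ⊢; omega)
        simpa [Nat.add_assoc, Nat.add_comm 1 k, Nat.add_left_comm] using this

-- ===== VERDICT (by name: the statement is the Claim_ definition above) =====
theorem strip_zeros_spec : Claim_equal_strip_zeros := by
  intro myrows table_data _ hpre
  unfold Spec_strip_zeros strip_zeros strip_zeros_alt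
  rw [pvOuterA_eq table_data myrows 0 [] (by simpa using hpre.1)
    (by simpa using hpre.2)]
  simp
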